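-- pv_equiv track=rewrite | github.com/AlgoLab/cancer_ea | prog/collection_helpers.py | index_of_largest_set_in_list
-- ===== SOURCE A (Python) =====
-- def index_of_largest_set_in_list(list1):
--     """ Obtain index of the element that contains largest set in list of pairs,
--         where second component od pair is set.
--
--     Args:
--         list1 (list): list of pairs (label,set).
--
--     Returns:
--         index f the element with largest set.
--     """
--     if( len(list1)==0):
--         return -1
--     ind =0
--     (l,s)= list1[ind]
--     max_len = len(s)
--     for i, val in enumerate(list1):
--         (l,s) = val
--         if( len(s) > max_len):
--             ind = i
--             max_len = len(s)
--     return ind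
-- ===== SOURCE B (Python) =====
-- def index_of_largest_set_in_list(list1):
--     if len(list1) == 0:
--         return -1
--     lengths = [len(s) for (l, s) in list1]
--     m = max(lengths)
--     return lengths.index(m)
-- ===== Notes on version B (the rewrite author's own statement) =====
-- stated objective: simpler
-- what changed: Replaced the fused running-max/index scan (manual state with a redundant first-element compare) by two plain passes: materialize the list of set sizes, then max() and list.index() to locate the first maximum.
import Mathlib
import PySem

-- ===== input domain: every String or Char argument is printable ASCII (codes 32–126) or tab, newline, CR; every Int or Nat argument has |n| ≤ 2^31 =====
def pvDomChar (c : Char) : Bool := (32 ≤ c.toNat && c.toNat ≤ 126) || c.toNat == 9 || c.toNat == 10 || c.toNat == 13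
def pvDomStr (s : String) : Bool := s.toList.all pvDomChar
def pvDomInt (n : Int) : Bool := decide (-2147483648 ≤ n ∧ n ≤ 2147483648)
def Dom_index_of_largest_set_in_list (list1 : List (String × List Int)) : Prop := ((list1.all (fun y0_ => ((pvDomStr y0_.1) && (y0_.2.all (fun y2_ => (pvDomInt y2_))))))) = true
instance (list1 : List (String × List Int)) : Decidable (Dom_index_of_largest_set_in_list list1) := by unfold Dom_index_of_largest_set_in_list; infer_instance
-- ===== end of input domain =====

-- B is the same linear argmax restated as two plain passes (sizes table, then max + index); no speed claim.

-- ===== PORT A =====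
-- A: fused scan over enumerate(list1) carrying (ind, max_len), seeded from list1[0].
def index_of_largest_set_in_list (list1 : List (String × List Int)) : Int :=
  match list1 with
  | [] => -1
  | (_, s0) :: _ =>
    (((PySem.List.enumerate list1 0).foldl
        (fun (st : Int × Int) (iv : Int × (String × List Int)) =>
          if (iv.2.2.length : Int) > st.2 then (iv.1, (iv.2.2.length : Int)) else st)
        (0, (s0.length : Int)))).1

-- ===== PORT B =====
-- B: build the lengths table, take max, locate its first occurrence.
def index_of_largest_set_in_list_alt (list1 : List (String × List Int)) : Int :=
  match list1 with
  | [] => -1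
  | _ :: _ =>
    let lengths : List Int := list1.map (fun p => (p.2.length : Int))
    let m : Int := (PySem.List.max? lengths (fun y => y)).getD 0
    ((PySem.List.index? lengths m).getD 0 : Int)

-- ===== PRECONDITION & SPEC =====
def Spec_index_of_largest_set_in_list (list1 : List (String × List Int)) (out : Int) : Prop := out = index_of_largest_set_in_list_alt list1
instance (list1 : List (String × List Int)) (out : Int) : Decidable (Spec_index_of_largest_set_in_list list1 out) := by unfold Spec_index_of_largest_set_in_list; infer_instance

-- ===== CLAIM (what is proved, stated in full; the proofs are below) =====
def Claim_equal_index_of_largest_set_in_list : Prop := ∀ (list1 : List (String × List Int)), Dom_index_of_largest_set_in_list list1 → Spec_index_of_largest_set_in_list list1 (index_of_largest_set_in_list list1)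

-- ===== LEMMAS AND PROOFS =====

-- A's loop, restated structurally on the list of lengths.
def pvRunA : List Int → Int → Int → Int → Int × Int
  | [], _, ind, ml => (ind, ml)
  | x :: t, i, ind, ml =>
    if x > ml then pvRunA t (i + 1) i x else pvRunA t (i + 1) ind ml

lemma pvRunA_eq_foldl (l : List (String × List Int)) (i ind ml : Int) :
    ((PySem.List.enumerate l i).foldl
        (fun (st : Int × Int) (iv : Int × (String × List Int)) =>
          if (iv.2.2.length : Int) > st.2 then (iv.1, (iv.2.2.length : Int)) else st)
        (ind, ml))
      = pvRunA (l.map (fun p => (p.2.length : Int))) i ind ml := by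
  induction l generalizing i ind ml with
  | nil => simp [PySem.List.enumerate_nil, pvRunA]
  | cons p t ih =>
    rw [PySem.List.enumerate_cons]
    simp only [List.foldl_cons, List.map_cons, pvRunA]
    split <;> exact ih _ _ _

lemma pvRunA_append (u v : List Int) (i ind ml : Int) :
    pvRunA (u ++ v) i ind ml
      = pvRunA v (i + u.length) (pvRunA u i ind ml).1 (pvRunA u i ind ml).2 := by
  induction u generalizing i ind ml with
  | nil => simp [pvRunA]
  | cons x t ih =>
    simp only [List.cons_append, pvRunA]
    split <;> (rw [ih]; congr 1; simp [List.length_cons]; ring)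

lemma pvRunA_snd (xs : List Int) (i ind ml : Int) :
    (pvRunA xs i ind ml).2 = xs.foldl max ml := by
  induction xs generalizing i ind ml with
  | nil => rfl
  | cons x t ih =>
    simp only [pvRunA, List.foldl_cons]
    split
    · rw [ih]; congr 1; omega
    · rw [ih]; congr 1; omega

lemma pvRunA_main (x : Int) (t : List Int) :
    (pvRunA (x :: t) 0 0 x).1
      = ((PySem.List.index? (x :: t) (t.foldl max x)).getD 0 : Int) := by
  induction t using List.reverseRecOn with
  | nil => simp [pvRunA]
  | append_singleton t' y ih =>
    have hM : (pvRunA (x :: t') 0 0 x).2 = t'.foldl max x := by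
      rw [pvRunA_snd]
      simp only [List.foldl_cons, max_self]
    have hrun : pvRunA (x :: (t' ++ [y])) 0 0 x
        = pvRunA [y] (0 + (x :: t').length) (pvRunA (x :: t') 0 0 x).1 (pvRunA (x :: t') 0 0 x).2 := by
      rw [← List.cons_append, pvRunA_append]
    have hmem : t'.foldl max x ∈ x :: t' := by
      rcases PySem.List.foldl_max_mem t' x with h | h
      · rw [h]; exact List.mem_cons_self
      · exact List.mem_cons_of_mem _ h
    have hub : ∀ z ∈ x :: t', z ≤ t'.foldl max x := by
      intro z hz
      rcases List.mem_cons.mp hz with h | h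
      · subst h; exact (PySem.List.le_foldl_max t' z).1
      · exact (PySem.List.le_foldl_max t' x).2 z h
    have hfold : (t' ++ [y]).foldl max x = max (t'.foldl max x) y := by
      simp [List.foldl_append]
    by_cases hy : y > t'.foldl max x
    · -- new maximum at the appended position
      have hynot : y ∉ x :: t' := by
        intro hmemy
        exact absurd (hub y hmemy) (not_le.mpr hy)
      have hmax' : (t' ++ [y]).foldl max x = y := by
        rw [hfold]; omega
      rw [hrun, hM, pvRunA, if_pos hy]
      simp only [pvRunA, hmax']
      rw [← List.cons_append, PySem.List.index?_append_singleton_self _ y hynot]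
      simp
    · -- old maximum stands; its first occurrence is unchanged
      have hmax' : (t' ++ [y]).foldl max x = t'.foldl max x := by
        rw [hfold]; omega
      rw [hrun, hM, pvRunA, if_neg hy]
      simp only [pvRunA, hmax']
      rw [← List.cons_append, PySem.List.index?_append_of_mem _ hmem]
      exact ih

-- ===== VERDICT (by name: the statement is the Claim_ definition above) =====
theorem index_of_largest_set_in_list_spec : Claim_equal_index_of_largest_set_in_list := by
  intro list1 _
  unfold Spec_index_of_largest_set_in_list index_of_largest_set_in_list index_of_largest_set_in_list_alt
  match list1 with
  | [] => rfl
  | (l0, s0) :: rest =>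
    simp only
    rw [pvRunA_eq_foldl]
    simp only [List.map_cons]
    rw [PySem.List.max?_id_cons]
    simp only [Option.getD_some]
    exact pvRunA_main _ _
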